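-- pv_equiv track=rewrite | github.com/morikab/Igem_TAU_2021 | modules/ORF/calculating_cai.py | _synonymous_codons
-- ===== SOURCE A (Python) =====
-- genetic_code_dict = {
--         'ATA': 'I', 'ATC': 'I', 'ATT': 'I', 'ATG': 'M',
--         'ACA': 'T', 'ACC': 'T', 'ACG': 'T', 'ACT': 'T',
--         'AAC': 'N', 'AAT': 'N', 'AAA': 'K', 'AAG': 'K',
--         'AGC': 'S', 'AGT': 'S', 'AGA': 'R', 'AGG': 'R',
--         'CTA': 'L', 'CTC': 'L', 'CTG': 'L', 'CTT': 'L',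
--         'CCA': 'P', 'CCC': 'P', 'CCG': 'P', 'CCT': 'P',
--         'CAC': 'H', 'CAT': 'H', 'CAA': 'Q', 'CAG': 'Q',
--         'CGA': 'R', 'CGC': 'R', 'CGG': 'R', 'CGT': 'R',
--         'GTA': 'V', 'GTC': 'V', 'GTG': 'V', 'GTT': 'V',
--         'GCA': 'A', 'GCC': 'A', 'GCG': 'A', 'GCT': 'A',
--         'GAC': 'D', 'GAT': 'D', 'GAA': 'E', 'GAG': 'E',
--         'GGA': 'G', 'GGC': 'G', 'GGG': 'G', 'GGT': 'G',
--         'TCA': 'S', 'TCC': 'S', 'TCG': 'S', 'TCT': 'S',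
--         'TTC': 'F', 'TTT': 'F', 'TTA': 'L', 'TTG': 'L',
--         'TAC': 'Y', 'TAT': 'Y', 'TAA': '_', 'TAG': '_',
--         'TGC': 'C', 'TGT': 'C', 'TGA': '_', 'TGG': 'W',
--     }
--
-- def _synonymous_codons(genetic_code_dict=genetic_code_dict):
--
--     # invert the genetic code dictionary to map each amino acid to its codons
--     codons_for_amino_acid = {}
--     for codon, amino_acid in genetic_code_dict.items():
--         codons_for_amino_acid[amino_acid] = codons_for_amino_acid.get(amino_acid, [])
--         codons_for_amino_acid[amino_acid].append(codon)
--
--     # create dictionary of synonymous codons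
--     # Example: {'CTT': ['CTT', 'CTG', 'CTA', 'CTC', 'TTA', 'TTG'], 'ATG': ['ATG']...}
--     return {
--         codon: codons_for_amino_acid[genetic_code_dict[codon]]
--         for codon in genetic_code_dict.keys()
--     }
-- ===== SOURCE B (Python) =====
-- # B: no inverse index — each codon's synonym list is read off the item list
-- # directly with one filter comprehension (simpler; quadratic but tiny fixed input).
-- genetic_code_dict = {
--         'ATA': 'I', 'ATC': 'I', 'ATT': 'I', 'ATG': 'M',
--         'ACA': 'T', 'ACC': 'T', 'ACG': 'T', 'ACT': 'T',
--         'AAC': 'N', 'AAT': 'N', 'AAA': 'K', 'AAG': 'K',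
--         'AGC': 'S', 'AGT': 'S', 'AGA': 'R', 'AGG': 'R',
--         'CTA': 'L', 'CTC': 'L', 'CTG': 'L', 'CTT': 'L',
--         'CCA': 'P', 'CCC': 'P', 'CCG': 'P', 'CCT': 'P',
--         'CAC': 'H', 'CAT': 'H', 'CAA': 'Q', 'CAG': 'Q',
--         'CGA': 'R', 'CGC': 'R', 'CGG': 'R', 'CGT': 'R',
--         'GTA': 'V', 'GTC': 'V', 'GTG': 'V', 'GTT': 'V',
--         'GCA': 'A', 'GCC': 'A', 'GCG': 'A', 'GCT': 'A',
--         'GAC': 'D', 'GAT': 'D', 'GAA': 'E', 'GAG': 'E',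
--         'GGA': 'G', 'GGC': 'G', 'GGG': 'G', 'GGT': 'G',
--         'TCA': 'S', 'TCC': 'S', 'TCG': 'S', 'TCT': 'S',
--         'TTC': 'F', 'TTT': 'F', 'TTA': 'L', 'TTG': 'L',
--         'TAC': 'Y', 'TAT': 'Y', 'TAA': '_', 'TAG': '_',
--         'TGC': 'C', 'TGT': 'C', 'TGA': '_', 'TGG': 'W',
--     }
--
-- def _synonymous_codons(genetic_code_dict=genetic_code_dict):
--     items = list(genetic_code_dict.items())
--     return {codon: [c for c, a in items if a == aa] for codon, aa in items}
-- ===== Notes on version B (the rewrite author's own statement) =====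
-- stated objective: simpler
-- what changed: B drops A's inverse amino-acid->codons hash index and its keys()+double-lookup pass entirely: one dict comprehension over the items maps each codon straight to a filter of the item list on its amino acid.
import Mathlib
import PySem

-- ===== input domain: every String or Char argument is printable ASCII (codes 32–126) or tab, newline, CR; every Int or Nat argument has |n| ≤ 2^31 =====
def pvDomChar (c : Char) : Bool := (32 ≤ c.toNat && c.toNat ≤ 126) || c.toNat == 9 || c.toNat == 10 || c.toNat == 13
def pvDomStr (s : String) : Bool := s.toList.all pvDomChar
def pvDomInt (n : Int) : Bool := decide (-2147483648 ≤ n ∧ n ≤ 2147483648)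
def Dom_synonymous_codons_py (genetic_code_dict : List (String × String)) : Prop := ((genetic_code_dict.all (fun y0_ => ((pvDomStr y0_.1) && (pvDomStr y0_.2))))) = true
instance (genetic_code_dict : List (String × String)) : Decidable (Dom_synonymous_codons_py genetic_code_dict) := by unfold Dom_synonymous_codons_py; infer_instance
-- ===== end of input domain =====

-- B replaces A's inverse amino-acid index and double dict lookup by a direct filter
-- of the item list per codon (simpler; return-value equivalence only).

-- ===== PORT A =====
def synonymous_codons_py (genetic_code_dict : List (String × String)) : List (String × List String) :=
  -- codons_for_amino_acid: for codon, aa in items: d[aa] = d.get(aa, []); d[aa].append(codon)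
  let inv := genetic_code_dict.foldl
    (fun d p => d.modify p.2 [] (fun v => v ++ [p.1])) PySem.Dict.empty
  -- {codon: inv[genetic_code_dict[codon]] for codon in genetic_code_dict.keys()}
  -- (both lookups always succeed since codon comes from the dict's own keys)
  (genetic_code_dict.map Prod.fst).map
    (fun codon => (codon, inv.getD ((PySem.Dict.mk genetic_code_dict).getD codon "") []))

-- ===== PORT B =====
def synonymous_codons_py_alt (genetic_code_dict : List (String × String)) : List (String × List String) :=
  genetic_code_dict.map
    (fun p => (p.1, (genetic_code_dict.filter (fun q => q.2 == p.2)).map Prod.fst))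

-- ===== PRECONDITION & SPEC =====
-- Pre_ requires distinct keys: the association list stands for a Python dict, which can
-- never hold duplicate keys, so no actual call of A is excluded.
def Pre_synonymous_codons_py (genetic_code_dict : List (String × String)) : Prop :=
  (genetic_code_dict.map Prod.fst).Nodup
instance (genetic_code_dict : List (String × String)) : Decidable (Pre_synonymous_codons_py genetic_code_dict) := by unfold Pre_synonymous_codons_py; infer_instance

def pvWitness_synonymous_codons_py : (List (String × String)) :=
  [("AAA", "K"), ("AAG", "K"), ("ATG", "M")]

def Spec_synonymous_codons_py (genetic_code_dict : List (String × String)) (out : List (String × List String)) : Prop := out = synonymous_codons_py_alt genetic_code_dict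
instance (genetic_code_dict : List (String × String)) (out : List (String × List String)) : Decidable (Spec_synonymous_codons_py genetic_code_dict out) := by unfold Spec_synonymous_codons_py; infer_instance

-- ===== CLAIM (what is proved, stated in full; the proofs are below) =====
def Claim_equal_synonymous_codons_py : Prop := ∀ (genetic_code_dict : List (String × String)), Dom_synonymous_codons_py genetic_code_dict → Pre_synonymous_codons_py genetic_code_dict → Spec_synonymous_codons_py genetic_code_dict (synonymous_codons_py genetic_code_dict)

-- ===== LEMMAS AND PROOFS =====

-- A's inverse-index entry at an amino acid is exactly the filtered codon list B uses.
lemma inv_getD (l : List (String × String)) (aa : String) :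
    (l.foldl (fun d p => d.modify p.2 [] (fun v => v ++ [p.1]))
      (PySem.Dict.empty : PySem.Dict String (List String))).getD aa []
      = (l.filter (fun q => q.2 == aa)).map Prod.fst := by
  have h := PySem.Dict.getD_foldl_modify_append (l := l.map Prod.swap)
    (d := (PySem.Dict.empty : PySem.Dict String (List String))) (c := aa)
  simpa [List.foldl_map, List.filter_map, List.map_map, Function.comp, Prod.swap] using h

-- under Nodup keys, indexing the dict at one of its own pairs' keys returns that pair's value
lemma mk_getD (l : List (String × String)) (h : (l.map Prod.fst).Nodup)
    (p : String × String) (hp : p ∈ l) :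
    (PySem.Dict.mk l).getD p.1 "" = p.2 := by
  exact PySem.Dict.getD_of_mem_items (d := PySem.Dict.mk l) (k := p.1) (v := p.2) hp h ""

-- ===== VERDICT (by name: the statement is the Claim_ definition above) =====
theorem synonymous_codons_py_spec : Claim_equal_synonymous_codons_py := by
  intro l _ hpre
  unfold Spec_synonymous_codons_py synonymous_codons_py synonymous_codons_py_alt
  rw [List.map_map]
  refine List.map_congr_left ?_
  intro p hp
  simp only [Function.comp]
  rw [mk_getD l hpre p hp, inv_getD]
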